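-- pv_equiv track=rewrite | github.com/mariusBRM/Chain-of-though_UCL | src/generation_processing.py | starts_with_def
-- ===== SOURCE A (Python) =====
-- def starts_with_def(text):
--     """ Check if the generated text start with a def or not."""
--     lines = text.split('\n')
--     found_comment = False
--
--     for line in lines:
--         stripped_line = line.strip()
--
--         if not found_comment and stripped_line.startswith('#'):
--             found_comment = True
--             continue
--
--         if found_comment and stripped_line:
--             return stripped_line.startswith('def')
--
--     return False
-- ===== SOURCE B (Python) =====
-- def starts_with_def(text):
--     """ Check if the generated text start with a def or not."""
--     ne = [s for s in (line.strip() for line in text.split('\n')) if s]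
--     for prev, cur in zip(ne, ne[1:]):
--         if prev.startswith('#'):
--             return cur.startswith('def')
--     return False
-- ===== Notes on version B (the rewrite author's own statement) =====
-- stated objective: alternative
-- what changed: B filters the stripped lines down to the non-empty ones once and then runs a single adjacent-pairs check, deciding at the first pair whose left element is a comment line whether its right neighbour is a def header; this is correct because a comment line is itself non-empty, so the first non-empty line after it is exactly its successor in the filtered list, which eliminates A's flag-driven state machine.
import Mathlib
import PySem

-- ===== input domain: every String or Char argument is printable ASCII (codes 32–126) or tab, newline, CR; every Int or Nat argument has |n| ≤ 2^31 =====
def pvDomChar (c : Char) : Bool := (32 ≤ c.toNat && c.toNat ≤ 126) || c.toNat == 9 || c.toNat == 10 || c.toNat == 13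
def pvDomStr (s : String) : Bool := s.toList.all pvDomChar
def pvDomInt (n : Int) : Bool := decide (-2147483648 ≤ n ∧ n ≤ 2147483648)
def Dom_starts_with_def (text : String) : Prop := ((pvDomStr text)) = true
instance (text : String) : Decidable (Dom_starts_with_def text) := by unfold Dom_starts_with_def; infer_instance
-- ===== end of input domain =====

-- B replaces A's flag-driven state machine by one adjacent-pairs check over the
-- filtered non-empty stripped lines; objective: alternative, same cost.

-- ===== PORT A =====
-- A's for-loop over the lines, carrying the found_comment flag.
def pvALoop : List String → Bool → Bool
  | [], _ => false
  | line :: rest, found =>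
    let s := PySem.Str.strip line
    if !found && PySem.Str.startswith s "#" then pvALoop rest true
    else if found && !(s == "") then PySem.Str.startswith s "def"
    else pvALoop rest found

def starts_with_def (text : String) : Bool :=
  pvALoop ((PySem.Str.split? text "\n").getD []) false

-- ===== PORT B =====
-- Source B's for-loop over zip(ne, ne[1:]): adjacent pairs of the filtered list.
def pvPairScan : List String → Bool
  | a :: b :: rest =>
    if PySem.Str.startswith a "#" then PySem.Str.startswith b "def"
    else pvPairScan (b :: rest)
  | _ => false

def starts_with_def_alt (text : String) : Bool :=
  let ne := (((PySem.Str.split? text "\n").getD []).map PySem.Str.strip).filter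
      (fun s => !(s == ""))
  pvPairScan ne

-- ===== PRECONDITION & SPEC =====
def Spec_starts_with_def (text : String) (out : Bool) : Prop := out = starts_with_def_alt text
instance (text : String) (out : Bool) : Decidable (Spec_starts_with_def text out) := by unfold Spec_starts_with_def; infer_instance

-- ===== CLAIM (what is proved, stated in full; the proofs are below) =====
def Claim_equal_starts_with_def : Prop := ∀ (text : String), Dom_starts_with_def text → Spec_starts_with_def text (starts_with_def text)

-- ===== LEMMAS AND PROOFS =====

-- A string starting with '#' is non-empty.
theorem startswith_hash_ne_empty (s : String) :
    PySem.Str.startswith s "#" = true → ¬(s = "") := by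
  intro h he; subst he; revert h; decide

-- Once the flag is set, A's loop returns the head test of the filtered suffix.
theorem pvALoop_true (ls : List String) :
    pvALoop ls true =
      (match (ls.map PySem.Str.strip).filter (fun s => !(s == "")) with
       | [] => false
       | s :: _ => PySem.Str.startswith s "def") := by
  induction ls with
  | nil => rfl
  | cons l rest ih =>
    by_cases h : PySem.Str.strip l = ""
    · simp [pvALoop, h, ih]
    · simp [pvALoop, h]

-- With the flag unset, A's loop equals B's pair scan of the filtered list.
theorem pvALoop_false (ls : List String) :
    pvALoop ls false =
      pvPairScan ((ls.map PySem.Str.strip).filter (fun s => !(s == ""))) := by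
  induction ls with
  | nil => rfl
  | cons l rest ih =>
    by_cases hh : PySem.Str.startswith (PySem.Str.strip l) "#" = true
    · have hne := startswith_hash_ne_empty _ hh
      simp only [pvALoop, Bool.not_false, Bool.true_and, Bool.false_and, hh, if_true,
        List.map_cons, List.filter_cons]
      rw [pvALoop_true rest]
      rw [show ((if (!(PySem.Str.strip l == "")) = true then
            PySem.Str.strip l :: (rest.map PySem.Str.strip).filter (fun s => !(s == ""))
          else (rest.map PySem.Str.strip).filter (fun s => !(s == ""))) =
          PySem.Str.strip l :: (rest.map PySem.Str.strip).filter (fun s => !(s == "")))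
        from if_pos (by simp [hne])]
      cases hf : (rest.map PySem.Str.strip).filter (fun s => !(s == "")) with
      | nil => simp [pvPairScan]
      | cons b t =>
        have hh' := hh
        simp at hh'
        simp [pvPairScan, hh']
    · by_cases he : PySem.Str.strip l = ""
      · simp only [pvALoop, he, Bool.not_false, Bool.true_and, Bool.false_and,
          List.map_cons, List.filter_cons]
        rw [show (PySem.Str.startswith "" "#") = false from rfl]
        simp [ih]
      · simp only [pvALoop, Bool.not_false, Bool.true_and, Bool.false_and, hh,
          Bool.false_eq_true, if_false, List.map_cons, List.filter_cons, ih]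
        rw [show ((if (!(PySem.Str.strip l == "")) = true then
            PySem.Str.strip l :: (rest.map PySem.Str.strip).filter (fun s => !(s == ""))
          else (rest.map PySem.Str.strip).filter (fun s => !(s == ""))) =
          PySem.Str.strip l :: (rest.map PySem.Str.strip).filter (fun s => !(s == "")))
        from if_pos (by simp [he])]
        cases hf : (rest.map PySem.Str.strip).filter (fun s => !(s == "")) with
        | nil => simp [pvPairScan]
        | cons b t =>
          have hh' := hh
          simp at hh'
          simp [pvPairScan, hh']

-- ===== VERDICT (by name: the statement is the Claim_ definition above) =====
theorem starts_with_def_spec : Claim_equal_starts_with_def := by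
  intro text _
  unfold Spec_starts_with_def starts_with_def starts_with_def_alt
  exact pvALoop_false _
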